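-- pv_equiv track=rewrite | github.com/NatanGarcias/Competitive-Programming | UVA/636.py | f
-- ===== SOURCE A (Python) =====
-- def f(num, temp):
--     i=0
--     aux =0
--     aux2 =0
--     while(num>0):
--         aux2 = num%10
--         num = num//10
--         if(aux2>=temp):
--             return 0
--
--         aux= int(aux+aux2*pow(temp,i))
--         i+=1
--
--     return aux
-- ===== SOURCE B (Python) =====
-- def f(num, temp):
--     # Collect decimal digits (LSB-first), validate them all, then evaluate
--     # MSB-first with Horner's rule -- no exponentiation, no position counter.
--     digits = []
--     n = num
--     while n > 0:
--         digits.append(n % 10)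
--         n //= 10
--     if any(d >= temp for d in digits):
--         return 0
--     result = 0
--     for d in reversed(digits):
--         result = result * temp + d
--     return result
-- ===== Notes on version B (the rewrite author's own statement) =====
-- stated objective: alternative
-- what changed: B separates digit extraction from evaluation: it collects the decimal digits once, validates them all against the base, then evaluates MSB-first with Horner's rule (result = result*temp + d), eliminating A's per-digit pow(temp,i) power-sum and position counter.
import Mathlib
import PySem

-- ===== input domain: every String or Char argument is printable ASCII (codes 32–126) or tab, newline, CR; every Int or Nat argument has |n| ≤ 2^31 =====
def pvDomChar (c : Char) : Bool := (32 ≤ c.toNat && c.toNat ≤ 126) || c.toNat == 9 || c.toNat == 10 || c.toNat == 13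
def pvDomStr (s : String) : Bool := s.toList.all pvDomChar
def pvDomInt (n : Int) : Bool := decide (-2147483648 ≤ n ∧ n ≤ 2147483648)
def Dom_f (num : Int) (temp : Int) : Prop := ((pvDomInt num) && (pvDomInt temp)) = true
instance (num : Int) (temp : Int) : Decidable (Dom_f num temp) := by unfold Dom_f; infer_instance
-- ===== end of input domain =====

-- B separates digit extraction from validation and evaluates MSB-first with
-- Horner's rule, replacing A's LSB-first pow(temp,i) power-sum.

-- ===== PORT A =====
-- A's while loop, LSB-first: aux2 = num % 10; num //= 10; early return 0 when
-- aux2 >= temp; else aux += aux2 * temp^i; i += 1.  The single-use locals aux2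
-- and the updated num are inlined.  The counter i is a nonnegative Python int,
-- ported as Nat, so pow(temp, i) = temp ^ i exactly.  The recursion is made
-- structural with fuel = num.bit_length(), which the loop can never exhaust:
-- num is at least halved (in fact divided by 10) each iteration.
def fLoop : Nat → Int → Int → Int → Nat → Int
  | 0, _, _, aux, _ => aux
  | fuel + 1, num, temp, aux, i =>
    if num > 0 then
      if PySem.Int.mod num 10 ≥ temp then 0
      else fLoop fuel (PySem.Int.floordiv num 10) temp (aux + PySem.Int.mod num 10 * temp ^ i) (i + 1)
    else aux

def f (num : Int) (temp : Int) : Int := fLoop (PySem.Int.bitLength num) num temp 0 0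

-- ===== PORT B =====
-- digits.append(n % 10); n //= 10  — builds the LSB-first digit list; fuel as in port A.
def digitsLoop : Nat → Int → List Int → List Int
  | 0, _, acc => acc
  | fuel + 1, n, acc =>
    if n > 0 then digitsLoop fuel (PySem.Int.floordiv n 10) (acc ++ [PySem.Int.mod n 10])
    else acc

def f_alt (num : Int) (temp : Int) : Int :=
  let digits := digitsLoop (PySem.Int.bitLength num) num []
  if digits.any (fun d => d ≥ temp) then 0
  else digits.reverse.foldl (fun result d => result * temp + d) 0

-- ===== PRECONDITION & SPEC =====
def Spec_f (num : Int) (temp : Int) (out : Int) : Prop := out = f_alt num temp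
instance (num : Int) (temp : Int) (out : Int) : Decidable (Spec_f num temp out) := by unfold Spec_f; infer_instance

-- ===== CLAIM (what is proved, stated in full; the proofs are below) =====
def Claim_equal_f : Prop := ∀ (num : Int) (temp : Int), Dom_f num temp → Spec_f num temp (f num temp)

-- ===== LEMMAS AND PROOFS =====

-- The accumulator only ever receives appends: digitsLoop is acc ++ the digit list.
theorem digitsLoop_acc : ∀ (fuel : Nat) (n : Int) (acc : List Int),
    digitsLoop fuel n acc = acc ++ digitsLoop fuel n [] := by
  intro fuel
  induction fuel with
  | zero => intro n acc; simp [digitsLoop]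
  | succ fuel ih =>
    intro n acc
    by_cases h : n > 0
    · simp only [digitsLoop, h, if_true]
      rw [ih _ (acc ++ [PySem.Int.mod n 10]), ih _ ([] ++ [PySem.Int.mod n 10])]
      simp
    · simp [digitsLoop, h]

-- One step of the While loop, when n > 0, prepends the least digit.
theorem digitsLoop_cons (fuel : Nat) (n : Int) (h : n > 0) :
    digitsLoop (fuel + 1) n []
      = PySem.Int.mod n 10 :: digitsLoop fuel (PySem.Int.floordiv n 10) [] := by
  simp only [digitsLoop, h, if_true]
  rw [digitsLoop_acc]
  simp

-- Horner evaluation of the reversed digit list, as B's foldl computes it.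
theorem horner_cons (temp d : Int) (ds : List Int) :
    (d :: ds).reverse.foldl (fun r x => r * temp + x) 0
      = (ds.reverse.foldl (fun r x => r * temp + x) 0) * temp + d := by
  simp [List.foldl_append]

-- Main invariant: with enough fuel, A's loop returns 0 when some digit reaches
-- the base, and otherwise adds the Horner value shifted by temp^i to aux.
theorem fLoop_eq : ∀ (fuel : Nat) (n temp aux : Int) (i : Nat), n.toNat < 2 ^ fuel →
    fLoop fuel n temp aux i =
      if (digitsLoop fuel n []).any (fun d => d ≥ temp) then 0
      else aux + ((digitsLoop fuel n []).reverse.foldl (fun r d => r * temp + d) 0) * temp ^ i := by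
  intro fuel
  induction fuel with
  | zero =>
    intro n temp aux i _
    simp [fLoop, digitsLoop]
  | succ fuel ih =>
    intro n temp aux i hb
    by_cases h : n > 0
    · have hm : PySem.Int.mod n 10 = n % 10 := PySem.Int.mod_eq_emod_of_pos (by norm_num)
      have hf : PySem.Int.floordiv n 10 = n / 10 := PySem.Int.floordiv_eq_ediv_of_pos (by norm_num)
      have hb' : (PySem.Int.floordiv n 10).toNat < 2 ^ fuel := by
        rw [pow_succ] at hb
        rw [hf]
        omega
      rw [digitsLoop_cons fuel n h]
      simp only [fLoop, h, if_true]
      by_cases hd : PySem.Int.mod n 10 ≥ temp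
      · rw [if_pos hd, if_pos (by simp only [List.any_cons, Bool.or_eq_true, decide_eq_true_eq]; exact Or.inl hd)]
      · rw [if_neg hd, ih _ temp _ (i + 1) hb']
        by_cases hrest : ((digitsLoop fuel (PySem.Int.floordiv n 10) []).any fun d => decide (d ≥ temp)) = true
        · have hcons : ((PySem.Int.mod n 10 :: digitsLoop fuel (PySem.Int.floordiv n 10) []).any fun d => decide (d ≥ temp)) = true := by
            simp only [List.any_cons, Bool.or_eq_true]
            exact Or.inr hrest
          rw [if_pos hrest, if_pos hcons]
        · have hcons : ¬ ((PySem.Int.mod n 10 :: digitsLoop fuel (PySem.Int.floordiv n 10) []).any fun d => decide (d ≥ temp)) = true := by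
            simp only [List.any_cons, Bool.or_eq_true, decide_eq_true_eq]
            push Not
            exact ⟨lt_of_not_ge hd, hrest⟩
          rw [if_neg hrest, if_neg hcons, horner_cons]
          ring
    · simp [fLoop, digitsLoop, h]

-- ===== VERDICT (by name: the statement is the Claim_ definition above) =====
theorem f_spec : Claim_equal_f := by
  intro num temp _
  unfold Spec_f f f_alt
  rw [fLoop_eq (PySem.Int.bitLength num) num temp 0 0
    (by have := PySem.Int.lt_two_pow_bitLength num; omega)]
  by_cases hany : ((digitsLoop (PySem.Int.bitLength num) num []).any fun d => decide (d ≥ temp)) = true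
  · rw [if_pos hany, if_pos hany]
  · rw [if_neg hany, if_neg hany]
    ring
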